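-- pv_equiv track=rewrite | github.com/Kai124816/Class-Encore-Fall | week_9/solutions.py | unique_neighbors
-- ===== SOURCE A (Python) =====
-- def unique_neighbors(li: list[int]) -> list[int]:
--     """
--     Returns a new list containing elements from li that are different from
--     at least one of their immediate neighbors.
--     """
--     n = len(li)
--     if n == 1:
--         return li # A single element has no neighbors, but is kept per the test case.
--
--     unique_list = []
--
--     # Iterate through all elements by index
--     for i in range(n):
--         curr_el = li[i]
--
--         # Check if the left neighbor exists and is different from the current element
--         # i > 0 ensures we are not at the first index (0)
--         left_differs = (i > 0) and (li[i - 1] != curr_el)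
--
--         # Check if the right neighbor exists and is different from the current element
--         # i < n - 1 ensures we are not at the last index
--         right_differs = (i < n - 1) and (li[i + 1] != curr_el)
--
--         # Append the current element if it differs from AT LEAST ONE of its neighbors
--         if left_differs or right_differs:
--             unique_list.append(curr_el)
--
--     return unique_list
-- ===== SOURCE B (Python) =====
-- def unique_neighbors(li: list[int]) -> list[int]:
--     """Edge-marking re-implementation: scan the n-1 adjacent pairs once and
--     mark both endpoints of each unequal pair in a keep-mask, then filter."""
--     n = len(li)
--     if n == 1:
--         return li
--     keep = [False] * n
--     for i in range(n - 1):
--         if li[i] != li[i + 1]: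
--             keep[i] = True
--             keep[i + 1] = True
--     return [x for x, k in zip(li, keep) if k]
-- ===== Notes on version B (the rewrite author's own statement) =====
-- stated objective: alternative
-- what changed: Replaced the per-element scan that re-examines both neighbors of every index with a single pass over the n-1 adjacent pairs that marks both endpoints of each unequal pair in a boolean keep-mask, then filters the list by the mask.
import Mathlib
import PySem

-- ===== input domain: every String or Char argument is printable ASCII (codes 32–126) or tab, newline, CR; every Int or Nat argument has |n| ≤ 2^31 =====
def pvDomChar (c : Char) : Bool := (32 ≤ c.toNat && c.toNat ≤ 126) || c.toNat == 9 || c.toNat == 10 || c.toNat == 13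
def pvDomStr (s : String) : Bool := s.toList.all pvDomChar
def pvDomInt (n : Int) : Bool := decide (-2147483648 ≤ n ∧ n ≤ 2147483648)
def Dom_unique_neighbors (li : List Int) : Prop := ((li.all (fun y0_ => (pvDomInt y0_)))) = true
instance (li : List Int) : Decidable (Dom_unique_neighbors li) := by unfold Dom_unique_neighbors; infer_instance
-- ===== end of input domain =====

-- B replaces A's per-node neighbor checks by one pass over adjacent pairs that marks
-- both endpoints of each unequal pair in a keep-mask, then filters by the mask (alternative decomposition, same cost).


-- ===== PORT A =====
def unique_neighbors (li : List Int) : List Int :=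
  let n : Int := li.length
  if n = 1 then li
  else
    (PySem.List.pyRange 0 n 1).foldl (fun acc i =>
      let curr := PySem.List.pyGetD li i 0
      let left_differs := decide (0 < i) && decide (PySem.List.pyGetD li (i - 1) 0 ≠ curr)
      let right_differs := decide (i < n - 1) && decide (PySem.List.pyGetD li (i + 1) 0 ≠ curr)
      if left_differs || right_differs then acc ++ [curr] else acc) []

-- ===== PORT B =====
def unique_neighbors_alt (li : List Int) : List Int :=
  let n : Int := li.length
  if n = 1 then li
  else
    let keep := (PySem.List.pyRange 0 (n - 1) 1).foldl (fun keep i =>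
      if PySem.List.pyGetD li i 0 ≠ PySem.List.pyGetD li (i + 1) 0 then
        PySem.List.pySetD (PySem.List.pySetD keep i true) (i + 1) true
      else keep) (List.replicate li.length false)
    ((li.zip keep).filter (·.2)).map (·.1)

-- ===== PRECONDITION & SPEC =====
def Spec_unique_neighbors (li : List Int) (out : List Int) : Prop := out = unique_neighbors_alt li
instance (li : List Int) (out : List Int) : Decidable (Spec_unique_neighbors li out) := by unfold Spec_unique_neighbors; infer_instance

-- ===== CLAIM (what is proved, stated in full; the proofs are below) =====
def Claim_equal_unique_neighbors : Prop := ∀ (li : List Int), Dom_unique_neighbors li → Spec_unique_neighbors li (unique_neighbors li)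

-- ===== LEMMAS AND PROOFS =====

-- the keep condition for index j, stated over Nat
def pvCond (li : List Int) (j : Nat) : Bool :=
  (decide (0 < j) && decide (li.getD (j - 1) 0 ≠ li.getD j 0)) ||
  (decide (j + 1 < li.length) && decide (li.getD (j + 1) 0 ≠ li.getD j 0))

-- mask state after processing edges 0..k-1
def pvMaskVal (li : List Int) (k j : Nat) : Bool :=
  (decide (j < k) && decide (li.getD j 0 ≠ li.getD (j + 1) 0)) ||
  (decide (0 < j) && decide (j ≤ k) && decide (li.getD (j - 1) 0 ≠ li.getD j 0))

theorem pvSet_map_range {α : Type} (n k : Nat) (f : Nat → α) (v : α) (_hk : k < n) :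
    ((List.range n).map f).set k v = (List.range n).map (fun j => if j = k then v else f j) := by
  apply List.ext_getElem
  · simp
  · intro i h1 h2
    simp only [List.getElem_set, List.getElem_map, List.getElem_range]
    by_cases h : k = i
    · rw [if_pos h, if_pos h.symm]
    · rw [if_neg h, if_neg (fun hh => h hh.symm)]

theorem pvMaskVal_zero (li : List Int) (j : Nat) : pvMaskVal li 0 j = false := by
  unfold pvMaskVal
  rw [decide_eq_false (by omega : ¬ (j < 0))]
  by_cases h0 : 0 < j
  · rw [decide_eq_false (by omega : ¬ (j ≤ 0))]
    simp
  · rw [decide_eq_false h0]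
    simp

theorem pvMaskVal_succ_other (li : List Int) (k j : Nat) (h1 : j ≠ k) (h2 : j ≠ k + 1) :
    pvMaskVal li (k + 1) j = pvMaskVal li k j := by
  unfold pvMaskVal
  rw [decide_eq_decide.mpr (show (j < k + 1) ↔ (j < k) by omega),
    decide_eq_decide.mpr (show (j ≤ k + 1) ↔ (j ≤ k) by omega)]

theorem pvMask_fold (li : List Int) (k : Nat) (hk : k ≤ li.length - 1) :
    (PySem.List.pyRange 0 (k : Int) 1).foldl (fun keep i =>
      if PySem.List.pyGetD li i 0 ≠ PySem.List.pyGetD li (i + 1) 0 then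
        PySem.List.pySetD (PySem.List.pySetD keep i true) (i + 1) true
      else keep) (List.replicate li.length false)
    = (List.range li.length).map (pvMaskVal li k) := by
  induction k with
  | zero =>
    rw [show ((0 : Nat) : Int) = 0 by norm_num, PySem.List.pyRange_one_eq_nil (le_refl 0)]
    simp only [List.foldl_nil]
    apply List.ext_getElem
    · simp
    · intro i hh1 hh2
      simp [pvMaskVal_zero]
  | succ k ih =>
    have hk' : k ≤ li.length - 1 := Nat.le_of_succ_le hk
    have hkn : k < li.length := by omega
    have hkn1 : k + 1 < li.length := by omega
    have hrng : PySem.List.pyRange 0 (((k + 1 : Nat)) : Int) 1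
        = PySem.List.pyRange 0 (k : Int) 1 ++ [(k : Int)] := by
      rw [show (((k + 1 : Nat)) : Int) = (k : Int) + 1 by push_cast; ring]
      exact PySem.List.pyRange_one_succ_right (by positivity)
    rw [hrng, List.foldl_append, ih hk']
    simp only [List.foldl_cons, List.foldl_nil]
    rw [show ((k : Int) + 1) = (((k + 1 : Nat)) : Int) by push_cast; ring]
    rw [PySem.List.pyGetD_natCast, PySem.List.pyGetD_natCast]
    by_cases hd : li.getD k 0 = li.getD (k + 1) 0
    · rw [if_neg (by simpa using hd)]
      apply List.map_congr_left
      intro j _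
      by_cases h1 : j = k + 1
      · rw [h1]
        unfold pvMaskVal
        simp only [Nat.add_sub_cancel]
        rw [decide_eq_false (by omega : ¬ (k + 1 < k)),
          decide_eq_false (by omega : ¬ (k + 1 < k + 1)),
          decide_eq_false (by omega : ¬ (k + 1 ≤ k)),
          decide_eq_false (not_not_intro hd)]
        simp
      · by_cases h2 : j = k
        · rw [h2]
          unfold pvMaskVal
          rw [decide_eq_false (by omega : ¬ (k < k)),
            decide_eq_true (Nat.lt_succ_self k),
            decide_eq_false (not_not_intro hd)]
          simp
        · exact (pvMaskVal_succ_other li k j h2 h1).symm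
    · rw [if_pos (by simpa using hd)]
      rw [PySem.List.pySetD_natCast, PySem.List.pySetD_natCast]
      rw [pvSet_map_range _ _ _ _ hkn]
      rw [pvSet_map_range _ _ _ _ hkn1]
      apply List.map_congr_left
      intro j _
      by_cases h1 : j = k + 1
      · rw [h1, if_pos rfl]
        unfold pvMaskVal
        simp only [Nat.add_sub_cancel]
        rw [decide_eq_true (Nat.succ_pos k), decide_eq_true (le_refl (k + 1)),
          decide_eq_true hd]
        simp
      · rw [if_neg h1]
        by_cases h2 : j = k
        · rw [h2, if_pos rfl]
          unfold pvMaskVal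
          rw [decide_eq_true (Nat.lt_succ_self k), decide_eq_true hd]
          simp
        · rw [if_neg h2]
          exact (pvMaskVal_succ_other li k j h2 h1).symm

theorem pvMaskVal_final (li : List Int) (j : Nat) (hj : j < li.length) :
    pvMaskVal li (li.length - 1) j = pvCond li j := by
  unfold pvMaskVal pvCond
  rw [decide_eq_decide.mpr (show (li.getD j 0 ≠ li.getD (j + 1) 0)
        ↔ (li.getD (j + 1) 0 ≠ li.getD j 0) from ne_comm),
    decide_eq_decide.mpr (show (j < li.length - 1) ↔ (j + 1 < li.length) by omega),
    decide_eq_true (show (j ≤ li.length - 1) by omega)]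
  rw [Bool.and_true]
  exact Bool.or_comm ..

theorem pvA_fold (li : List Int) :
    (PySem.List.pyRange 0 (li.length : Int) 1).foldl (fun acc i =>
      let curr := PySem.List.pyGetD li i 0
      let left_differs := decide (0 < i) && decide (PySem.List.pyGetD li (i - 1) 0 ≠ curr)
      let right_differs := decide (i < (li.length : Int) - 1) && decide (PySem.List.pyGetD li (i + 1) 0 ≠ curr)
      if left_differs || right_differs then acc ++ [curr] else acc) []
    = (((List.range li.length).filter (pvCond li)).map (fun j => li.getD j 0)) := by
  rw [PySem.List.foldl_append_if]
  rw [List.nil_append]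
  rw [PySem.List.pyRange_zero_natCast]
  rw [List.filter_map, List.map_map]
  congr 1
  · funext j
    simp only [Function.comp_apply]
    exact PySem.List.pyGetD_natCast ..
  · apply List.filter_congr
    intro j hj
    simp only [List.mem_range] at hj
    simp only [Function.comp_apply]
    rw [PySem.List.pyGetD_natCast]
    unfold pvCond
    congr 1
    · by_cases h0 : 0 < j
      · rw [show ((j : Nat) : Int) - 1 = (((j - 1 : Nat)) : Int) by omega,
          PySem.List.pyGetD_natCast, decide_eq_decide.mpr (show (0 < (j : Int)) ↔ (0 < j) by omega)]
      · have hj0 : j = 0 := by omega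
        subst hj0
        simp
    · rw [show ((j : Nat) : Int) + 1 = (((j + 1 : Nat)) : Int) by push_cast; ring,
        PySem.List.pyGetD_natCast,
        decide_eq_decide.mpr (show ((j : Int) < (li.length : Int) - 1) ↔ (j + 1 < li.length) by omega)]

theorem pvZip_map_range (li : List Int) (f : Nat → Bool) :
    li.zip ((List.range li.length).map f)
    = (List.range li.length).map (fun j => (li.getD j 0, f j)) := by
  apply List.ext_getElem
  · simp
  · intro i h1 h2
    simp only [List.length_zip, List.length_map, List.length_range, min_self] at h1
    simp only [List.getElem_zip, List.getElem_map, List.getElem_range]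
    rw [List.getD_eq_getElem li 0 h1]

theorem pvB_eq (li : List Int) :
    ((li.zip ((List.range li.length).map (pvCond li))).filter (·.2)).map (·.1)
    = ((List.range li.length).filter (pvCond li)).map (fun j => li.getD j 0) := by
  rw [pvZip_map_range]
  rw [List.filter_map, List.map_map]
  rfl

-- ===== VERDICT (by name: the statement is the Claim_ definition above) =====
theorem unique_neighbors_spec : Claim_equal_unique_neighbors := by
  intro li _
  unfold Spec_unique_neighbors unique_neighbors unique_neighbors_alt
  by_cases hnil : li = []
  · subst hnil
    decide
  · have hlen : 1 ≤ li.length := List.length_pos_of_ne_nil hnil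
    by_cases h1 : (li.length : Int) = 1
    · simp [h1]
    · simp only [h1, if_false]
      rw [pvA_fold]
      rw [show (li.length : Int) - 1 = (((li.length - 1 : Nat)) : Int) by omega]
      rw [pvMask_fold li (li.length - 1) (le_refl _)]
      rw [show (List.range li.length).map (pvMaskVal li (li.length - 1))
          = (List.range li.length).map (pvCond li) from
        List.map_congr_left (fun j hj => pvMaskVal_final li j (List.mem_range.mp hj))]
      rw [pvB_eq]
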